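-- pv_equiv track=rewrite | github.com/MeowsephPurrr/AdventOfCode | 2024/09/part1.py | swap_file_alloc
-- ===== SOURCE A (Python) =====
-- def swap_file_alloc(file_alloc: list) -> list:
--     L = 0
--     R = len(file_alloc) - 1
--
--     empty_char = "."
--
--     while L < R:
--         if L < R and file_alloc[L] != empty_char:
--             L += 1
--             continue
--
--         if L < R and file_alloc[R] == empty_char:
--             R -= 1
--             continue
--
--         file_alloc[L], file_alloc[R] = file_alloc[R], file_alloc[L]
--
--         L += 1
--         R -= 1
--
--     return file_alloc
-- ===== SOURCE B (Python) =====
-- def swap_file_alloc(file_alloc: list) -> list: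
--     # One-pass decomposition instead of two-pointer swapping: count the non-dot
--     # cells, gather the non-dots of the tail right-to-left, fill the dots of the
--     # front with them, blank the tail; mutates file_alloc in place like A.
--     n = len(file_alloc)
--     k = sum(1 for x in file_alloc if x != ".")
--     rear = [x for x in reversed(file_alloc[k:]) if x != "."]
--     front = []
--     i = 0
--     for x in file_alloc[:k]:
--         if x == ".":
--             front.append(rear[i])
--             i += 1
--         else:
--             front.append(x)
--     file_alloc[:] = front + ["."] * (n - k)
--     return file_alloc
-- ===== Notes on version B (the rewrite author's own statement) =====
-- stated objective: alternative
-- what changed: Replaces A's in-place two-pointer swap loop by a decomposition: count the non-dot cells (k), collect the tail's non-dots right-to-left, fill the dots among the first k cells from that list, and blank positions k..n-1.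
import Mathlib
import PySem

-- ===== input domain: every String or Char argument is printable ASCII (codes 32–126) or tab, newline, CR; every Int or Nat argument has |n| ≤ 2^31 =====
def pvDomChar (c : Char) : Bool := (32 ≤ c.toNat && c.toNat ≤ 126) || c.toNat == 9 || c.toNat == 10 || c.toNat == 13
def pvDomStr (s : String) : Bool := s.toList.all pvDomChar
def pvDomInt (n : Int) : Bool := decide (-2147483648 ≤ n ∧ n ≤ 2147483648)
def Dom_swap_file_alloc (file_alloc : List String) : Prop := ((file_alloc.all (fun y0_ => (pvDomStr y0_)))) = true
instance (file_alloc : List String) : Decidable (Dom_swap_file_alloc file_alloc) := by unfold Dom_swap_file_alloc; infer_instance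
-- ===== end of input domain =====

-- B replaces A's two-pointer swap loop by a count/split/refill decomposition (alternative, same O(n) cost);
-- both Pythons mutate the argument list in place — the equivalence proved here is about the RETURN value.


-- ===== PORT A =====
-- A's while loop over the two indices L and R; every read/write A performs is in
-- range (0 ≤ L < R ≤ len-1 at that moment), so getD/set with Nat indices is exact here.
def swapLoopA (fa : List String) (L R : Nat) : List String :=
  if h : L < R then
    if fa.getD L "." ≠ "." then
      swapLoopA fa (L + 1) R
    else if fa.getD R "." = "." then
      swapLoopA fa L (R - 1)
    else
      swapLoopA ((fa.set L (fa.getD R ".")).set R (fa.getD L ".")) (L + 1) (R - 1)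
  else fa
termination_by R - L
decreasing_by all_goals omega

def swap_file_alloc (file_alloc : List String) : List String :=
  swapLoopA file_alloc 0 (file_alloc.length - 1)

-- ===== PORT B =====
-- the front-filling loop of Source B: copy the first k cells, replacing each "." by the
-- next element of rear (Python's rear[i] with an advancing i = consuming the list);
-- rear never runs out on the reachable calls, so headD's default is never used.
def fillFront (front rear : List String) : List String :=
  match front with
  | [] => []
  | x :: xs =>
    if x = "." then rear.headD "." :: fillFront xs rear.tail
    else x :: fillFront xs rear

def swap_file_alloc_alt (file_alloc : List String) : List String :=
  let k := (file_alloc.filter (fun x => x != ".")).length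
  let rear := ((file_alloc.drop k).reverse).filter (fun x => x != ".")
  fillFront (file_alloc.take k) rear ++ List.replicate (file_alloc.length - k) "."

-- ===== PRECONDITION & SPEC =====
def Spec_swap_file_alloc (file_alloc : List String) (out : List String) : Prop := out = swap_file_alloc_alt file_alloc
instance (file_alloc : List String) (out : List String) : Decidable (Spec_swap_file_alloc file_alloc out) := by unfold Spec_swap_file_alloc; infer_instance

-- ===== CLAIM (what is proved, stated in full; the proofs are below) =====
def Claim_equal_swap_file_alloc : Prop := ∀ (file_alloc : List String), Dom_swap_file_alloc file_alloc → Spec_swap_file_alloc file_alloc (swap_file_alloc file_alloc)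

-- ===== LEMMAS AND PROOFS =====

lemma kOf_le (seg : List String) : (seg.filter (fun x => x != ".")).length ≤ seg.length :=
  List.length_filter_le _ _

lemma alt_nil : swap_file_alloc_alt [] = [] := by decide

lemma alt_single (x : String) : swap_file_alloc_alt [x] = [x] := by
  by_cases hx : x = "." <;> simp [swap_file_alloc_alt, fillFront, hx]

lemma alt_cons_nondot (x : String) (rest : List String) (hx : x ≠ ".") :
    swap_file_alloc_alt (x :: rest) = x :: swap_file_alloc_alt rest := by
  simp [swap_file_alloc_alt, hx, fillFront]

lemma alt_snoc_dot (seg : List String) :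
    swap_file_alloc_alt (seg ++ ["."]) = swap_file_alloc_alt seg ++ ["."] := by
  have hk := kOf_le seg
  simp only [swap_file_alloc_alt, List.filter_append, List.filter_cons, bne_self_eq_false,
    Bool.false_eq_true, if_false, List.filter_nil, List.append_nil, List.length_append]
  rw [List.take_append_of_le_length hk, List.drop_append_of_le_length hk]
  have h1 : seg.length + 1 - (List.filter (fun x => x != ".") seg).length
       = (seg.length - (List.filter (fun x => x != ".") seg).length) + 1 := by omega
  simp [h1, List.replicate_succ' (n := seg.length - (List.filter (fun x => x != ".") seg).length)]

lemma alt_swap (mid : List String) (y : String) (hy : y ≠ ".") :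
    swap_file_alloc_alt ("." :: (mid ++ [y])) = y :: swap_file_alloc_alt mid ++ ["."] := by
  have hk := kOf_le mid
  have hyb : (y != ".") = true := by simp [hy]
  simp only [swap_file_alloc_alt, List.filter_cons, List.filter_append, hyb, bne_self_eq_false,
    Bool.false_eq_true, if_false, if_true, List.filter_nil, List.length_append, List.length_cons,
    List.length_nil, Nat.zero_add, List.take_succ_cons, List.drop_succ_cons]
  rw [List.take_append_of_le_length hk, List.drop_append_of_le_length hk]
  simp only [List.reverse_append, List.reverse_cons, List.reverse_nil, List.nil_append,
    List.singleton_append, List.filter_cons, hyb, if_true]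
  rw [show fillFront ("." :: List.take (List.filter (fun x => x != ".") mid).length mid)
        (y :: List.filter (fun x => x != ".") (List.drop (List.filter (fun x => x != ".") mid).length mid).reverse)
      = y :: fillFront (List.take (List.filter (fun x => x != ".") mid).length mid)
        (List.filter (fun x => x != ".") (List.drop (List.filter (fun x => x != ".") mid).length mid).reverse)
    from by simp [fillFront]]
  have h1 : mid.length + 1 + 1 - ((List.filter (fun x => x != ".") mid).length + 1)
       = (mid.length - (List.filter (fun x => x != ".") mid).length) + 1 := by omega
  simp [h1, List.replicate_succ' (n := mid.length - (List.filter (fun x => x != ".") mid).length)]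

lemma getD_middle (pre seg post : List String) (i : Nat) (h : i < seg.length) :
    (pre ++ (seg ++ post)).getD (pre.length + i) "." = seg.getD i "." := by
  rw [List.getD_eq_getElem?_getD, List.getD_eq_getElem?_getD,
    List.getElem?_append_right (by omega)]
  have h2 : pre.length + i - pre.length = i := by omega
  rw [h2, List.getElem?_append_left h]

lemma set_middle (pre seg post : List String) (i : Nat) (v : String) (h : i < seg.length) :
    (pre ++ (seg ++ post)).set (pre.length + i) v = pre ++ (seg.set i v ++ post) := by
  rw [List.set_append_right _ _ (by omega)]
  have h2 : pre.length + i - pre.length = i := by omega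
  rw [h2, List.set_append_left _ _ h]

lemma swapLoopA_eq (n : Nat) : ∀ (seg : List String), seg.length ≤ n → ∀ (pre post : List String),
    swapLoopA (pre ++ (seg ++ post)) pre.length (pre.length + seg.length - 1)
      = pre ++ (swap_file_alloc_alt seg ++ post) := by
  induction n with
  | zero =>
    intro seg hs pre post
    have h0 : seg = [] := List.eq_nil_of_length_eq_zero (by omega)
    subst h0
    rw [swapLoopA, alt_nil]
    simp
  | succ m ih =>
    intro seg hs pre post
    match seg with
    | [] =>
      rw [swapLoopA, alt_nil]; simp
    | [x] =>
      rw [swapLoopA, alt_single]; simp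
    | x :: y :: tl =>
      obtain ⟨mid, z, hmz⟩ : ∃ mid z, y :: tl = mid ++ [z] :=
        ⟨(y :: tl).dropLast, (y :: tl).getLast (by simp),
          (List.dropLast_append_getLast (by simp)).symm⟩
      rw [hmz]
      have hmlen : mid.length + 2 ≤ m + 1 := by
        have h2 := congrArg List.length hmz
        simp at h2 hs
        omega
      have hLR : pre.length < pre.length + (x :: (mid ++ [z])).length - 1 := by
        simp
      rw [swapLoopA, dif_pos hLR]
      have hget0 : (pre ++ ((x :: (mid ++ [z])) ++ post)).getD pre.length "." = x := by
        simp
      have hgetR : (pre ++ ((x :: (mid ++ [z])) ++ post)).getD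
          (pre.length + (x :: (mid ++ [z])).length - 1) "." = z := by
        have h1 : pre.length + (x :: (mid ++ [z])).length - 1
            = pre.length + (mid.length + 1) := by simp
        rw [h1, getD_middle pre (x :: (mid ++ [z])) post (mid.length + 1) (by simp)]
        rw [List.getD_eq_getElem?_getD]
        simp
      rw [hget0, hgetR]
      by_cases hx : x = "."
      · simp only [hx, ne_eq, not_true_eq_false, if_false]
        by_cases hz : z = "."
        · rw [if_pos hz]
          subst hz
          have harr : (("." : String) :: (mid ++ ["."])) ++ post
              = ("." :: mid) ++ (["."] ++ post) := by simp
          rw [show pre ++ ((("." : String) :: (mid ++ ["."])) ++ post)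
              = pre ++ (("." :: mid) ++ (["."] ++ post)) from by rw [harr]]
          have hR1 : pre.length + (("." : String) :: (mid ++ ["."])).length - 1 - 1
              = pre.length + ("." :: mid).length - 1 := by simp
          rw [hR1]
          rw [ih ("." :: mid) (by (simp; omega)) pre (["."] ++ post)]
          rw [show ("." : String) :: (mid ++ ["."]) = ("." :: mid) ++ ["."] from by simp,
            alt_snoc_dot]
          simp
        · rw [if_neg hz]
          have hset : ((pre ++ ((("." : String) :: (mid ++ [z])) ++ post)).set pre.length z).set
                (pre.length + (("." : String) :: (mid ++ [z])).length - 1) "."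
              = pre ++ ((z :: (mid ++ ["."])) ++ post) := by
            have h0 : (pre ++ ((("." : String) :: (mid ++ [z])) ++ post)).set pre.length z
                = pre ++ ((z :: (mid ++ [z])) ++ post) := by
              simp
            rw [h0]
            have hRidx : pre.length + (("." : String) :: (mid ++ [z])).length - 1
                = pre.length + (mid.length + 1) := by simp
            rw [hRidx, set_middle pre (z :: (mid ++ [z])) post (mid.length + 1) "." (by simp)]
            congr 2
            simp [List.set_cons_succ, List.set_append_right _ _ (le_refl mid.length)]
          rw [hset]
          rw [show pre ++ ((z :: (mid ++ ["."])) ++ post)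
              = (pre ++ [z]) ++ (mid ++ (["."] ++ post)) from by simp]
          have hL1 : pre.length + 1 = (pre ++ [z]).length := by simp
          have hR2 : pre.length + (("." : String) :: (mid ++ [z])).length - 1 - 1
              = (pre ++ [z]).length + mid.length - 1 := by simp
          rw [hL1, hR2]
          rw [ih mid (by omega) (pre ++ [z]) (["."] ++ post)]
          rw [alt_swap mid z hz]
          simp
      · rw [if_pos hx]
        rw [show pre ++ ((x :: (mid ++ [z])) ++ post)
            = (pre ++ [x]) ++ ((mid ++ [z]) ++ post) from by simp]
        have hL1 : pre.length + 1 = (pre ++ [x]).length := by simp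
        have hR1 : pre.length + (x :: (mid ++ [z])).length - 1
            = (pre ++ [x]).length + (mid ++ [z]).length - 1 := by (simp; omega)
        rw [hL1, hR1]
        rw [ih (mid ++ [z]) (by (simp; omega)) (pre ++ [x]) post]
        rw [alt_cons_nondot x (mid ++ [z]) hx]
        simp

-- ===== VERDICT (by name: the statement is the Claim_ definition above) =====
theorem swap_file_alloc_spec : Claim_equal_swap_file_alloc := by
  intro fa _
  show swap_file_alloc fa = swap_file_alloc_alt fa
  have := swapLoopA_eq fa.length fa le_rfl [] []
  simpa [swap_file_alloc] using this
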